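-- pv_equiv track=rewrite | github.com/GODLOCAL/godlocal | performance_logger.py | _extract_locked_sections
-- ===== SOURCE A (Python) =====
-- _LOCKED_MARKER = "[LOCKED]"
--
-- def _extract_locked_sections(soul_text: str) -> list[tuple[int, int]]:
--     """Return (start, end) line ranges that are marked [LOCKED] — LLM must not modify."""
--     locked_ranges = []
--     lines = soul_text.splitlines(keepends=True)
--     i = 0
--     while i < len(lines):
--         if _LOCKED_MARKER in lines[i]:
--             start = i
--             # Lock extends until next section header (##) or EOF
--             j = i + 1
--             while j < len(lines) and not (lines[j].startswith("##") or lines[j].startswith("# ")):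
--                 j += 1
--             locked_ranges.append((start, j))
--             i = j
--         else:
--             i += 1
--     return locked_ranges
-- ===== SOURCE B (Python) =====
-- _LOCKED_MARKER = "[LOCKED]"
--
-- def _extract_locked_sections(soul_text: str) -> list:
--     """Single flat pass: close an open locked range at a section header, open on the marker."""
--     lines = soul_text.splitlines(keepends=True)
--     ranges = []
--     open_start = None
--     for i, line in enumerate(lines):
--         is_header = line.startswith("##") or line.startswith("# ")
--         if open_start is not None and is_header:
--             ranges.append((open_start, i))
--             open_start = None
--         if open_start is None and _LOCKED_MARKER in line:
--             open_start = i
--     if open_start is not None: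
--         ranges.append((open_start, len(lines)))
--     return ranges
-- ===== Notes on version B (the rewrite author's own statement) =====
-- stated objective: alternative
-- what changed: Replaced A's nested jump-ahead while loops (an inner scan that skips i forward past each locked section) by a single flat pass over enumerate(lines) with an open_start state variable: close an open range at a header, then possibly open at the marker.
import Mathlib
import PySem

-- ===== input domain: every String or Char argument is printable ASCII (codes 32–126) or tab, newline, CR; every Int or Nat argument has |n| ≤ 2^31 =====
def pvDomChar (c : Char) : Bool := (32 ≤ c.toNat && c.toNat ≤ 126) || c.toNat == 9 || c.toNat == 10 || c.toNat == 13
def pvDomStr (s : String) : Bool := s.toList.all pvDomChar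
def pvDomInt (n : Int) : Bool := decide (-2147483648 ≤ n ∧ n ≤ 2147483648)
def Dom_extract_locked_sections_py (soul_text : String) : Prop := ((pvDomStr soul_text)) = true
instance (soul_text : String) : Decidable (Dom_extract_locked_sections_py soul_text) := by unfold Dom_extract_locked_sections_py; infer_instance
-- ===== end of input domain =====

-- B replaces A's nested jump-ahead while loops by one flat state-machine pass (objective: alternative, same cost).


-- Both Pythons call soul_text.splitlines(keepends=True); we port it as PySem.Str.splitlines
-- (keepends=False). This is exact for both programs: keepends only appends the line terminator
-- ('\n', '\r' or '\r\n') to each line, and the terminator characters never occur in "[LOCKED]"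
-- nor in the prefixes "##" / "# ", so every containment/startswith test below is unchanged, and
-- the number of lines (hence every index) is the same.

-- shared by both ports: lines[j].startswith("##") or lines[j].startswith("# ")
def pvHeader (line : String) : Bool :=
  PySem.Str.startswith line "##" || PySem.Str.startswith line "# "

-- ===== PORT A =====
-- inner while loop: j += 1 until header or EOF
def pvAInner (lines : List String) (j : Nat) : Nat :=
  if h : j < lines.length then
    if pvHeader lines[j] then j else pvAInner lines (j + 1)
  else j
termination_by lines.length - j

-- needed by pvALoop's termination (the inner loop never moves j backwards)
theorem pvAInner_ge (lines : List String) (j : Nat) : j ≤ pvAInner lines j := by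
  fun_induction pvAInner with
  | case1 => omega
  | case2 j h hh ih => omega
  | case3 => omega

-- outer while loop over i
def pvALoop (lines : List String) (i : Nat) (acc : List (Int × Int)) : List (Int × Int) :=
  if h : i < lines.length then
    if PySem.Str.isIn "[LOCKED]" lines[i] then
      pvALoop lines (pvAInner lines (i + 1)) (acc ++ [((i : Int), (pvAInner lines (i + 1) : Int))])
    else pvALoop lines (i + 1) acc
  else acc
termination_by lines.length - i
decreasing_by
  · have := pvAInner_ge lines (i + 1); omega
  · omega

def extract_locked_sections_py (soul_text : String) : List (Int × Int) :=
  pvALoop (PySem.Str.splitlines soul_text) 0 []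

-- ===== PORT B =====
-- one loop iteration of B: first close an open range at a header, then maybe open at the marker
def pvBStep (st : List (Int × Int) × Option Int) (p : Int × String) :
    List (Int × Int) × Option Int :=
  let st1 : List (Int × Int) × Option Int :=
    match st.2 with
    | some o => if pvHeader p.2 then (st.1 ++ [(o, p.1)], none) else st
    | none => st
  match st1.2 with
  | none => if PySem.Str.isIn "[LOCKED]" p.2 then (st1.1, some p.1) else st1
  | some _ => st1

def extract_locked_sections_py_alt (soul_text : String) : List (Int × Int) :=
  let lines := PySem.Str.splitlines soul_text
  let res := (PySem.List.enumerate lines 0).foldl pvBStep ([], none)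
  match res.2 with
  | some o => res.1 ++ [(o, (lines.length : Int))]
  | none => res.1

-- ===== PRECONDITION & SPEC =====
def Spec_extract_locked_sections_py (soul_text : String) (out : List (Int × Int)) : Prop := out = extract_locked_sections_py_alt soul_text
instance (soul_text : String) (out : List (Int × Int)) : Decidable (Spec_extract_locked_sections_py soul_text out) := by unfold Spec_extract_locked_sections_py; infer_instance

-- ===== CLAIM (what is proved, stated in full; the proofs are below) =====
def Claim_equal_extract_locked_sections_py : Prop := ∀ (soul_text : String), Dom_extract_locked_sections_py soul_text → Spec_extract_locked_sections_py soul_text (extract_locked_sections_py soul_text)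

-- ===== LEMMAS AND PROOFS =====

-- B's trailing flush, as a function of the fold state
def pvFinalize (n : Nat) (r : List (Int × Int) × Option Int) : List (Int × Int) :=
  match r.2 with
  | some o => r.1 ++ [(o, (n : Int))]
  | none => r.1

theorem pvDrop_enumerate (lines : List String) (i : Nat) (h : i < lines.length) :
    (PySem.List.enumerate lines 0).drop i =
      ((i : Int), lines[i]) :: (PySem.List.enumerate lines 0).drop (i + 1) := by
  have hlen : i < (PySem.List.enumerate lines 0).length := by
    simpa [PySem.List.length_enumerate] using h
  rw [List.drop_eq_getElem_cons hlen]
  simp [PySem.List.getElem_enumerate]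

theorem pvALoop_skip (lines : List String) (i : Nat) (acc : List (Int × Int))
    (h : i < lines.length)
    (hm : PySem.Chars.isIn ['[', 'L', 'O', 'C', 'K', 'E', 'D', ']'] lines[i].toList = false) :
    pvALoop lines i acc = pvALoop lines (i + 1) acc := by
  conv_lhs => rw [pvALoop]
  simp [h, hm]

theorem pvALoop_open (lines : List String) (i : Nat) (acc : List (Int × Int))
    (h : i < lines.length)
    (hm : PySem.Chars.isIn ['[', 'L', 'O', 'C', 'K', 'E', 'D', ']'] lines[i].toList = true) :
    pvALoop lines i acc =
      pvALoop lines (pvAInner lines (i + 1))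
        (acc ++ [((i : Int), (pvAInner lines (i + 1) : Int))]) := by
  conv_lhs => rw [pvALoop]
  simp [h, hm]

-- the joint loop invariant: B's fold-from-i (plus final flush) equals A's loop from i,
-- where an open B state (some o) corresponds to A being inside its inner scan started at o
theorem pvMain (lines : List String) (i : Nat) (st : List (Int × Int) × Option Int)
    (hle : i ≤ lines.length) :
    pvFinalize lines.length (((PySem.List.enumerate lines 0).drop i).foldl pvBStep st) =
      match st.2 with
      | none => pvALoop lines i st.1
      | some o => pvALoop lines (pvAInner lines i)
          (st.1 ++ [(o, (pvAInner lines i : Int))]) := by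
  by_cases h : i < lines.length
  · rw [pvDrop_enumerate lines i h, List.foldl_cons]
    have ih := pvMain lines (i + 1) (pvBStep st ((i : Int), lines[i])) (by omega)
    rcases st with ⟨acc, op⟩
    rcases op with _ | o
    · -- closed state
      show _ = pvALoop lines i acc
      by_cases hm : PySem.Str.isIn "[LOCKED]" lines[i] = true
      · have hm' : PySem.Chars.isIn ['[', 'L', 'O', 'C', 'K', 'E', 'D', ']'] lines[i].toList = true := by simpa using hm
        have hstep : pvBStep (acc, none) ((i : Int), lines[i]) = (acc, some (i : Int)) := by
          simp [pvBStep, hm']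
        rw [hstep] at ih
        rw [hstep, ih, pvALoop_open lines i acc h hm']
      · have hm' : PySem.Chars.isIn ['[', 'L', 'O', 'C', 'K', 'E', 'D', ']'] lines[i].toList = false := by simpa using hm
        have hstep : pvBStep (acc, none) ((i : Int), lines[i]) = (acc, none) := by
          simp [pvBStep, hm']
        rw [hstep] at ih
        rw [hstep, ih, pvALoop_skip lines i acc h hm']
    · -- open state (o)
      show _ = pvALoop lines (pvAInner lines i) (acc ++ [(o, (pvAInner lines i : Int))])
      by_cases hh : pvHeader lines[i] = true
      · have hstop : pvAInner lines i = i := by rw [pvAInner]; simp [h, hh]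
        by_cases hm : PySem.Str.isIn "[LOCKED]" lines[i] = true
        · have hm' : PySem.Chars.isIn ['[', 'L', 'O', 'C', 'K', 'E', 'D', ']'] lines[i].toList = true := by simpa using hm
          have hstep : pvBStep (acc, some o) ((i : Int), lines[i])
              = (acc ++ [(o, (i : Int))], some (i : Int)) := by simp [pvBStep, hh, hm']
          rw [hstep] at ih
          rw [hstep, ih, hstop, pvALoop_open lines i _ h hm']
        · have hm' : PySem.Chars.isIn ['[', 'L', 'O', 'C', 'K', 'E', 'D', ']'] lines[i].toList = false := by simpa using hm
          have hstep : pvBStep (acc, some o) ((i : Int), lines[i])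
              = (acc ++ [(o, (i : Int))], none) := by simp [pvBStep, hh, hm']
          rw [hstep] at ih
          rw [hstep, ih, hstop, pvALoop_skip lines i _ h hm']
      · have hgo : pvAInner lines i = pvAInner lines (i + 1) := by
          rw [pvAInner]; simp [h, hh]
        have hstep : pvBStep (acc, some o) ((i : Int), lines[i]) = (acc, some o) := by
          simp [pvBStep, hh]
        rw [hstep] at ih
        rw [hstep, ih, hgo]
  · have hi : i = lines.length := by omega
    have : (PySem.List.enumerate lines 0).drop i = [] := by
      apply List.drop_eq_nil_of_le
      simp [PySem.List.length_enumerate, hi]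
    rw [this, List.foldl_nil]
    rcases st with ⟨acc, op⟩
    rcases op with _ | o
    · simp only [pvFinalize]
      rw [pvALoop]; simp [h]
    · have : pvAInner lines i = i := by rw [pvAInner]; simp [h]
      simp only [pvFinalize, this]
      rw [pvALoop]; simp [hi]
termination_by lines.length - i

-- ===== VERDICT (by name: the statement is the Claim_ definition above) =====
theorem extract_locked_sections_py_spec : Claim_equal_extract_locked_sections_py := by
  intro soul_text _
  unfold Spec_extract_locked_sections_py extract_locked_sections_py extract_locked_sections_py_alt
  have := pvMain (PySem.Str.splitlines soul_text) 0 ([], none) (by omega)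
  simpa [pvFinalize] using this.symm
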